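-- pv_equiv track=rewrite | github.com/Elsarrag-Apps/heatmap-public-app | heatmap_app.py | get_matching_key
-- ===== SOURCE A (Python) =====
-- def normalize_key(value):
--     return (
--         str(value)
--         .strip()
--         .lower()
--         .replace("–", "-")
--         .replace("—", "-")
--         .replace("°c", "c")
--         .replace("scenario", "")
--         .replace(" ", "")
--         .replace("-", "")
--     )
--
-- def get_matching_key(mapping, target):
--     if not isinstance(mapping, dict):
--         return None
--
--     if target in mapping:
--         return target
--
--     normalized_target = normalize_key(target)
--
--     for key in mapping.keys():
--         if normalize_key(key) == normalized_target:
--             return key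
--
--     for key in mapping.keys():
--         nk = normalize_key(key)
--         if normalized_target in nk or nk in normalized_target:
--             return key
--
--     return None
-- ===== SOURCE B (Python) =====
-- def normalize_key(value):
--     return (
--         str(value)
--         .strip()
--         .lower()
--         .replace("–", "-")
--         .replace("—", "-")
--         .replace("°c", "c")
--         .replace("scenario", "")
--         .replace(" ", "")
--         .replace("-", "")
--     )
--
-- def get_matching_key(mapping, target):
--     if not isinstance(mapping, dict):
--         return None
--
--     if target in mapping:
--         return target
--
--     normalized_target = normalize_key(target)
--
--     candidate = None
--     for key in mapping.keys():
--         nk = normalize_key(key)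
--         if nk == normalized_target:
--             return key
--         if candidate is None and (normalized_target in nk or nk in normalized_target):
--             candidate = key
--
--     return candidate
-- ===== Notes on version B (the rewrite author's own statement) =====
-- stated objective: simpler
-- what changed: A's two sequential scans over the keys (one for a normalized exact match, then a fresh scan for a substring match) are merged into a single pass that normalizes each key once, returns immediately on an exact normalized match, and latches the first substring candidate for use after the loop.
import Mathlib
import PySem

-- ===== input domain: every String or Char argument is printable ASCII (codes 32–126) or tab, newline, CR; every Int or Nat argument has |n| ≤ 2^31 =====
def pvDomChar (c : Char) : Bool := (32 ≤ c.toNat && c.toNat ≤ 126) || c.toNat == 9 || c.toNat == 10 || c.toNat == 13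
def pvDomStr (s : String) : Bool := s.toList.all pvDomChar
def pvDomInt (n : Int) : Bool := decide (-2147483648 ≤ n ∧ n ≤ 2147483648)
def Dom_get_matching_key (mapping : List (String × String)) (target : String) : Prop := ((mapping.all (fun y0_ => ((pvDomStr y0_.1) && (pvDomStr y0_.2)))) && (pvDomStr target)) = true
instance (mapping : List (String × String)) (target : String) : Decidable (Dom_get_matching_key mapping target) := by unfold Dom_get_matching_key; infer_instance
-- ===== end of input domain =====

-- One-line summary: B merges A's two scans over the keys into a single pass that
-- normalizes each key once, returning on an exact normalized match and latching the
-- first substring candidate (objective: simpler).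

-- ===== PORT A =====
-- normalize_key (shared source helper, transliterated once; both Pythons contain the same text)
def normalize_key (value : String) : String :=
  PySem.Str.replace
    (PySem.Str.replace
      (PySem.Str.replace
        (PySem.Str.replace
          (PySem.Str.replace
            (PySem.Str.replace
              (PySem.Str.lower (PySem.Str.strip value))
              "–" "-")
            "—" "-")
          "°c" "c")
        "scenario" "")
      " " "")
    "-" ""

-- first loop of A: exact normalized match
def scanExact_A : List (String × String) → String → Option String
  | [], _ => none
  | (k, _) :: t, nt => if normalize_key k = nt then some k else scanExact_A t nt

-- second loop of A: substring match
def scanSub_A : List (String × String) → String → Option String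
  | [], _ => none
  | (k, _) :: t, nt =>
      let nk := normalize_key k
      if PySem.Str.isIn nt nk || PySem.Str.isIn nk nt then some k else scanSub_A t nt

-- 'isinstance(mapping, dict)' is always true under the type convention, so the early return is dropped
def get_matching_key (mapping : List (String × String)) (target : String) : Option String :=
  if mapping.any (fun kv => kv.1 = target) then some target
  else
    let normalized_target := normalize_key target
    match scanExact_A mapping normalized_target with
    | some k => some k
    | none => scanSub_A mapping normalized_target

-- ===== PORT B =====
-- single loop of B, threading the first substring candidate
def scanOnce_B : List (String × String) → String → Option String → Option String
  | [], _, cand => cand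
  | (k, _) :: t, nt, cand =>
      let nk := normalize_key k
      if nk = nt then some k
      else
        scanOnce_B t nt
          (if cand.isNone && (PySem.Str.isIn nt nk || PySem.Str.isIn nk nt) then some k else cand)

def get_matching_key_alt (mapping : List (String × String)) (target : String) : Option String :=
  if mapping.any (fun kv => kv.1 = target) then some target
  else scanOnce_B mapping (normalize_key target) none

-- ===== PRECONDITION & SPEC =====
def Spec_get_matching_key (mapping : List (String × String)) (target : String) (out : Option String) : Prop := out = get_matching_key_alt mapping target
instance (mapping : List (String × String)) (target : String) (out : Option String) : Decidable (Spec_get_matching_key mapping target out) := by unfold Spec_get_matching_key; infer_instance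

-- ===== CLAIM (what is proved, stated in full; the proofs are below) =====
def Claim_equal_get_matching_key : Prop := ∀ (mapping : List (String × String)) (target : String), Dom_get_matching_key mapping target → Spec_get_matching_key mapping target (get_matching_key mapping target)

-- ===== LEMMAS AND PROOFS =====

-- B's single pass equals A's exact scan, falling back to the latched candidate, then A's substring scan.
theorem scanOnce_B_eq (l : List (String × String)) (nt : String) (cand : Option String) :
    scanOnce_B l nt cand =
      match scanExact_A l nt with
      | some k => some k
      | none =>
        match cand with
        | some c => some c
        | none => scanSub_A l nt := by
  induction l generalizing cand with
  | nil => cases cand <;> simp [scanOnce_B, scanExact_A, scanSub_A]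
  | cons kv t ih =>
      obtain ⟨k, v⟩ := kv
      by_cases h : normalize_key k = nt
      · simp [scanOnce_B, scanExact_A, h]
      · cases cand with
        | some c => simp [scanOnce_B, scanExact_A, h, ih]
        | none =>
            simp only [scanOnce_B, scanExact_A, scanSub_A, if_neg h, ih, Option.isNone_none,
              Bool.true_and]
            cases scanExact_A t nt with
            | some k' => rfl
            | none =>
                by_cases hs : (PySem.Chars.isIn nt.toList (normalize_key k).toList = true ∨
                    PySem.Chars.isIn (normalize_key k).toList nt.toList = true)
                · simp [hs]
                · simp [hs]

-- ===== VERDICT (by name: the statement is the Claim_ definition above) =====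
theorem get_matching_key_spec : Claim_equal_get_matching_key := by
  intro mapping target _
  unfold Spec_get_matching_key get_matching_key get_matching_key_alt
  by_cases hm : mapping.any (fun kv => kv.1 = target)
  · simp [hm]
  · rw [if_neg hm, if_neg hm, scanOnce_B_eq]
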